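-- pv_equiv track=rewrite | github.com/SujoyGhosh-scott/problem-solving | problem solving/happy-ladybugs.py | allBugsHappy
-- ===== SOURCE A (Python) =====
-- def allBugsHappy(b):
--     if b[0] != b[1]:
--         return False
--     if b[len(b)-1] != b[len(b)-2]:
--         return False
--     for i in range(1, len(b)-1):
--         if b[i] != b[i-1] and b[i] != b[i+1]:
--             return False
--     return True
-- ===== SOURCE B (Python) =====
-- def allBugsHappy(b):
--     # every maximal run of equal colors must have length >= 2
--     run_start = 0
--     for i in range(1, len(b)):
--         if b[i] != b[i-1]:
--             if i - run_start < 2: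
--                 return False
--             run_start = i
--     return len(b) - run_start >= 2
-- ===== Notes on version B (the rewrite author's own statement) =====
-- stated objective: alternative
-- what changed: B replaces A's first/last special-case checks plus a both-neighbors test per interior index with a single run-length scan that tracks where the current run of equal colors started and requires every maximal run to have length >= 2.
import Mathlib
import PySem

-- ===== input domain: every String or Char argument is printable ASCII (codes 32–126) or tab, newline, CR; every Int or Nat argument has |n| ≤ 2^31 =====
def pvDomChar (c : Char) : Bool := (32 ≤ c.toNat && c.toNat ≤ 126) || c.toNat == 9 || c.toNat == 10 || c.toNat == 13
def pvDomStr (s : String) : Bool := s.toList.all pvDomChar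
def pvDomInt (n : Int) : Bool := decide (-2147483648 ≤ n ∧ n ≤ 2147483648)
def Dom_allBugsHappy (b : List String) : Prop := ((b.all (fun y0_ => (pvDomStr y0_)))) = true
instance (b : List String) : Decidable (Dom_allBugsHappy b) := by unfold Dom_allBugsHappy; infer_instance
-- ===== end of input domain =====

-- B checks that every maximal run of equal colors has length ≥ 2 in one scan tracking the
-- current run's start, instead of A's first/last special checks plus a both-neighbors test;
-- objective: alternative decomposition (same linear cost).

-- ===== PORT A =====
-- A's `for i in range(1, len(b)-1)` loop with early return False.
-- Indices are in range on Pre_ (2 ≤ len b), so `getD _ ""` is exact there (Python b[i]).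
def allBugsHappyLoopA (b : List String) (i : Nat) : Bool :=
  if h : i < b.length - 1 then
    if b.getD i "" ≠ b.getD (i-1) "" ∧ b.getD i "" ≠ b.getD (i+1) "" then false
    else allBugsHappyLoopA b (i+1)
  else true
termination_by b.length - 1 - i

def allBugsHappy (b : List String) : Bool :=
  if b.getD 0 "" ≠ b.getD 1 "" then false
  else if b.getD (b.length - 1) "" ≠ b.getD (b.length - 2) "" then false
  else allBugsHappyLoopA b 1

-- ===== PORT B =====
-- B's `for i in range(1, len(b))` loop carrying run_start, then the final-run length check.
def allBugsHappyLoopB (b : List String) (i rs : Nat) : Bool :=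
  if h : i < b.length then
    if b.getD i "" ≠ b.getD (i-1) "" then
      if i - rs < 2 then false
      else allBugsHappyLoopB b (i+1) i
    else allBugsHappyLoopB b (i+1) rs
  else decide (2 ≤ b.length - rs)
termination_by b.length - i

def allBugsHappy_alt (b : List String) : Bool :=
  allBugsHappyLoopB b 1 0

-- ===== PRECONDITION & SPEC =====
-- A raises IndexError (at b[0] or b[1]) on lists of length < 2; exactly those are excluded.
def Pre_allBugsHappy (b : List String) : Prop := 2 ≤ b.length
instance (b : List String) : Decidable (Pre_allBugsHappy b) := by unfold Pre_allBugsHappy; infer_instance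
def pvWitness_allBugsHappy : List String := (["A", "A"])

def Spec_allBugsHappy (b : List String) (out : Bool) : Prop := out = allBugsHappy_alt b
instance (b : List String) (out : Bool) : Decidable (Spec_allBugsHappy b out) := by unfold Spec_allBugsHappy; infer_instance

-- ===== CLAIM (what is proved, stated in full; the proofs are below) =====
def Claim_equal_allBugsHappy : Prop := ∀ (b : List String), Dom_allBugsHappy b → Pre_allBugsHappy b → Spec_allBugsHappy b (allBugsHappy b)

-- ===== LEMMAS AND PROOFS =====

-- "position j has an equal neighbor": the semantic condition both programs decide.
def eqNbr (b : List String) (j : Nat) : Prop :=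
  (1 ≤ j ∧ b.getD j "" = b.getD (j-1) "") ∨ (j + 1 < b.length ∧ b.getD j "" = b.getD (j+1) "")

theorem loopA_iff (b : List String) (i : Nat) :
    allBugsHappyLoopA b i = true ↔
      ∀ j, i ≤ j → j < b.length - 1 →
        (b.getD j "" = b.getD (j-1) "" ∨ b.getD j "" = b.getD (j+1) "") := by
  generalize hd : b.length - 1 - i = d
  induction d generalizing i with
  | zero =>
    rw [allBugsHappyLoopA]
    have h : ¬ i < b.length - 1 := by omega
    simp only [h, dif_neg, not_false_iff, true_iff]
    intro j hij hj; omega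
  | succ d ih =>
    rw [allBugsHappyLoopA]
    have h : i < b.length - 1 := by omega
    simp only [h, dif_pos]
    by_cases hc : b.getD i "" ≠ b.getD (i-1) "" ∧ b.getD i "" ≠ b.getD (i+1) ""
    · rw [if_pos hc]
      constructor
      · intro hfalse; exact absurd hfalse (by simp)
      · intro hall
        rcases hall i le_rfl h with h1 | h2
        · exact absurd h1 hc.1
        · exact absurd h2 hc.2
    · rw [if_neg hc]
      rw [ih (i+1) (by omega)]
      constructor
      · intro hall j hij hj
        rcases Nat.eq_or_lt_of_le hij with heq | hlt
        · subst heq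
          rw [Classical.not_and_iff_not_or_not] at hc
          rcases hc with hc | hc
        
          · exact Or.inl (Classical.not_not.mp hc)
          · exact Or.inr (Classical.not_not.mp hc)
        · exact hall j hlt hj
      · intro hall j hij hj
        exact hall j (by omega) hj

theorem loopB_iff (b : List String) (hn : 2 ≤ b.length) :
    ∀ i rs, rs < i → i ≤ b.length →
      (∀ j, rs ≤ j → j < i → b.getD j "" = b.getD rs "") →
      (rs = 0 ∨ b.getD rs "" ≠ b.getD (rs-1) "") →
      (allBugsHappyLoopB b i rs = true ↔ ∀ j, rs ≤ j → j < b.length → eqNbr b j) := by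
  intro i
  generalize hd : b.length - i = d
  induction d generalizing i with
  | zero =>
    intro rs hrs hi hconst hstart
    have hie : i = b.length := by omega
    rw [allBugsHappyLoopB]
    have h : ¬ i < b.length := by omega
    simp only [h, dif_neg, not_false_iff, decide_eq_true_eq]
    constructor
    · intro h2 j hj1 hj2
      by_cases hjr : j = rs
      · subst hjr
        refine Or.inr ⟨by omega, ?_⟩
        rw [hconst (j+1) (by omega) (by omega), hconst j le_rfl (by omega)]
      · refine Or.inl ⟨by omega, ?_⟩
        rw [hconst j hj1 (by omega), hconst (j-1) (by omega) (by omega)]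
    · intro hall
      by_contra hlen
      have hrs0 : rs = b.length - 1 := by omega
      rcases hall rs le_rfl (by omega) with ⟨h1, h2⟩ | ⟨h1, h2⟩
      · rcases hstart with h0 | hne
        · omega
        · exact hne h2
      · omega
  | succ d ih =>
    intro rs hrs hi hconst hstart
    have h : i < b.length := by omega
    rw [allBugsHappyLoopB]
    simp only [h, dif_pos]
    by_cases hne : b.getD i "" ≠ b.getD (i-1) ""
    · rw [if_pos hne]
      have hir : b.getD (i-1) "" = b.getD rs "" := hconst (i-1) (by omega) (by omega)
      by_cases hshort : i - rs < 2
      · rw [if_pos hshort]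
        have hrsi : rs = i - 1 := by omega
        constructor
        · intro hfalse; exact absurd hfalse (by simp)
        · intro hall
          rcases hall rs le_rfl (by omega) with ⟨h1, h2⟩ | ⟨h1, h2⟩
          · rcases hstart with h0 | hne' <;> [omega; exact (hne' h2).elim]
          · refine (hne ?_).elim
            have hri : rs + 1 = i := by omega
            rw [← hri, show rs + 1 - 1 = rs by omega]
            exact h2.symm
      · rw [if_neg hshort]
        rw [ih (i+1) (by omega) i (by omega) (by omega)
            (by intro j hj1 hj2; have hji : j = i := Nat.le_antisymm (Nat.lt_succ_iff.mp hj2) hj1; rw [hji])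
            (Or.inr hne)]
        constructor
        · intro hall j hj1 hj2
          by_cases hji : i ≤ j
          · exact hall j hji hj2
          · by_cases hjr : j = rs
            · subst hjr
              refine Or.inr ⟨by omega, ?_⟩
              rw [hconst (j+1) (by omega) (by omega), hconst j le_rfl (by omega)]
            · refine Or.inl ⟨by omega, ?_⟩
              rw [hconst j hj1 (by omega), hconst (j-1) (by omega) (by omega)]
        · intro hall j hj1 hj2
          exact hall j (by omega) hj2
    · rw [if_neg hne]
      rw [Classical.not_not] at hne
      exact ih (i+1) (by omega) rs (by omega) (by omega)
        (by
          intro j hj1 hj2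
          by_cases hji : j = i
          · subst hji
            rw [hne]; exact hconst (j-1) (by omega) (by omega)
          · exact hconst j hj1 (by omega))
        hstart

theorem altB_iff (b : List String) (hn : 2 ≤ b.length) :
    allBugsHappy_alt b = true ↔ ∀ j, j < b.length → eqNbr b j := by
  unfold allBugsHappy_alt
  rw [loopB_iff b hn 1 0 (by omega) (by omega)
      (by intro j hj1 hj2; have hj0 : j = 0 := Nat.lt_one_iff.mp hj2; rw [hj0])
      (Or.inl rfl)]
  constructor
  · intro hall j hj; exact hall j (Nat.zero_le j) hj
  · intro hall j _ hj; exact hall j hj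

theorem aFull_iff (b : List String) (hn : 2 ≤ b.length) :
    allBugsHappy b = true ↔ ∀ j, j < b.length → eqNbr b j := by
  unfold allBugsHappy
  by_cases h01 : b.getD 0 "" ≠ b.getD 1 ""
  · rw [if_pos h01]
    constructor
    · intro hfalse; exact absurd hfalse (by simp)
    · intro hall
      rcases hall 0 (by omega) with ⟨h1, _⟩ | ⟨_, h2⟩
      · omega
      · exact (h01 h2).elim
  · rw [if_neg h01]
    rw [Classical.not_not] at h01
    by_cases hlast : b.getD (b.length - 1) "" ≠ b.getD (b.length - 2) ""
    · rw [if_pos hlast]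
      constructor
      · intro hfalse; exact absurd hfalse (by simp)
      · intro hall
        rcases hall (b.length - 1) (by omega) with ⟨_, h2⟩ | ⟨h1, _⟩
        · refine (hlast ?_).elim
          rw [show b.length - 1 - 1 = b.length - 2 by omega] at h2
          exact h2
        · omega
    · rw [if_neg hlast]
      rw [Classical.not_not] at hlast
      rw [loopA_iff]
      constructor
      · intro hall j hj
        by_cases hj0 : j = 0
        · subst hj0; exact Or.inr ⟨by omega, h01⟩
        · by_cases hjl : j = b.length - 1
          · subst hjl
            refine Or.inl ⟨by omega, ?_⟩
            rw [show b.length - 1 - 1 = b.length - 2 by omega]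
            exact hlast
          · rcases hall j (by omega) (by omega) with h | h
            · exact Or.inl ⟨by omega, h⟩
            · exact Or.inr ⟨by omega, h⟩
      · intro hall j hj1 hj2
        rcases hall j (by omega) with ⟨_, h⟩ | ⟨_, h⟩
        · exact Or.inl h
        · exact Or.inr h

-- ===== VERDICT (by name: the statement is the Claim_ definition above) =====
theorem allBugsHappy_spec : Claim_equal_allBugsHappy := by
  intro b _hdom hpre
  unfold Spec_allBugsHappy
  have hA := aFull_iff b hpre
  have hB := altB_iff b hpre
  cases hA' : allBugsHappy b <;> cases hB' : allBugsHappy_alt b <;> try rfl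
  · exact absurd (hA.mpr (hB.mp hB')) (by simp [hA'])
  · exact absurd (hB.mpr (hA.mp hA')) (by simp [hB'])
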